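-- pv_equiv track=rewrite | github.com/amandarenepearce-cyber/terravaultIQ-V7 | app_gui.py | recommend_frontend_pack
-- ===== SOURCE A (Python) =====
-- def recommend_frontend_pack(search_mode: str, keyword: str) -> str:
--     text = f"{search_mode} {keyword}".lower()
--     if "relocation interest finder" in text:
--         return "Relocation Capture Package"
--     if any(term in text for term in ["moving", "relocation", "interstate", "movers"]):
--         return "Google Ads"
--     if any(term in text for term in ["event", "grand opening", "launch", "festival", "sale"]):
--         return "Social Media Ads"
--     if any(term in text for term in ["roofer", "roofing", "plumber", "plumbing", "hvac", "contractor", "cleaner", "cleaning", "landscaping"]):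
--         return "Local SEO + Google Ads"
--     if "community" in text:
--         return "Social Media Ads"
--     if "public intent" in text:
--         return "Google Ads"
--     return "SEO"
-- ===== SOURCE B (Python) =====
-- TERM_RULES = {
--     "relocation interest finder": (0, "Relocation Capture Package"),
--     "moving": (1, "Google Ads"),
--     "relocation": (1, "Google Ads"),
--     "interstate": (1, "Google Ads"),
--     "movers": (1, "Google Ads"),
--     "event": (2, "Social Media Ads"),
--     "grand opening": (2, "Social Media Ads"),
--     "launch": (2, "Social Media Ads"),
--     "festival": (2, "Social Media Ads"),
--     "sale": (2, "Social Media Ads"),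
--     "roofer": (3, "Local SEO + Google Ads"),
--     "roofing": (3, "Local SEO + Google Ads"),
--     "plumber": (3, "Local SEO + Google Ads"),
--     "plumbing": (3, "Local SEO + Google Ads"),
--     "hvac": (3, "Local SEO + Google Ads"),
--     "contractor": (3, "Local SEO + Google Ads"),
--     "cleaner": (3, "Local SEO + Google Ads"),
--     "cleaning": (3, "Local SEO + Google Ads"),
--     "landscaping": (3, "Local SEO + Google Ads"),
--     "community": (4, "Social Media Ads"),
--     "public intent": (5, "Google Ads"),
-- }
--
-- def recommend_frontend_pack(search_mode: str, keyword: str) -> str: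
--     text = f"{search_mode} {keyword}".lower()
--     best = None
--     for term, (prio, pack) in TERM_RULES.items():
--         if term in text and (best is None or prio < best[0]):
--             best = (prio, pack)
--     return best[1] if best is not None else "SEO"
-- ===== Notes on version B (the rewrite author's own statement) =====
-- stated objective: alternative
-- what changed: Replaced the grouped if-cascade with early returns by a flat term->(priority, package) dictionary scanned in one full pass that keeps the minimum-priority matching term (min-by accumulator), returning its package or 'SEO' if nothing matched.
import Mathlib
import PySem

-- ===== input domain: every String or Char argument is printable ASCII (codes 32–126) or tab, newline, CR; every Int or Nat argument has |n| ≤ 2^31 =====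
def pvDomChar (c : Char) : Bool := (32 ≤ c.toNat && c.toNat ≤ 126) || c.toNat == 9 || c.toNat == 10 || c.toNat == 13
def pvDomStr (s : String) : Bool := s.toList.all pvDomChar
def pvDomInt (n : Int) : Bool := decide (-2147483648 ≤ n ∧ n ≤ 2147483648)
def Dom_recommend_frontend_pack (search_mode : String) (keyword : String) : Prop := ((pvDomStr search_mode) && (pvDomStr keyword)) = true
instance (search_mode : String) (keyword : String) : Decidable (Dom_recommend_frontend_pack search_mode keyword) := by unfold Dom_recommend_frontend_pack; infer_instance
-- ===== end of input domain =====

-- B replaces A's grouped if-cascade with a flat term→(priority, package) table scanned in one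
-- full pass keeping the minimum-priority match (alternative decomposition; same behaviour).


-- ===== PORT A =====
def recommend_frontend_pack (search_mode : String) (keyword : String) : String :=
  let text := PySem.Str.lower (search_mode ++ " " ++ keyword)
  if PySem.Str.isIn "relocation interest finder" text then "Relocation Capture Package"
  else if ["moving", "relocation", "interstate", "movers"].any (fun term => PySem.Str.isIn term text) then "Google Ads"
  else if ["event", "grand opening", "launch", "festival", "sale"].any (fun term => PySem.Str.isIn term text) then "Social Media Ads"
  else if ["roofer", "roofing", "plumber", "plumbing", "hvac", "contractor", "cleaner", "cleaning", "landscaping"].any (fun term => PySem.Str.isIn term text) then "Local SEO + Google Ads"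
  else if PySem.Str.isIn "community" text then "Social Media Ads"
  else if PySem.Str.isIn "public intent" text then "Google Ads"
  else "SEO"

-- ===== PORT B =====
-- flat dict TERM_RULES : term ↦ (priority, package), insertion order
def pvTermRules : List (String × Nat × String) :=
  [ ("relocation interest finder", 0, "Relocation Capture Package"),
    ("moving", 1, "Google Ads"), ("relocation", 1, "Google Ads"),
    ("interstate", 1, "Google Ads"), ("movers", 1, "Google Ads"),
    ("event", 2, "Social Media Ads"), ("grand opening", 2, "Social Media Ads"),
    ("launch", 2, "Social Media Ads"), ("festival", 2, "Social Media Ads"),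
    ("sale", 2, "Social Media Ads"),
    ("roofer", 3, "Local SEO + Google Ads"), ("roofing", 3, "Local SEO + Google Ads"),
    ("plumber", 3, "Local SEO + Google Ads"), ("plumbing", 3, "Local SEO + Google Ads"),
    ("hvac", 3, "Local SEO + Google Ads"), ("contractor", 3, "Local SEO + Google Ads"),
    ("cleaner", 3, "Local SEO + Google Ads"), ("cleaning", 3, "Local SEO + Google Ads"),
    ("landscaping", 3, "Local SEO + Google Ads"),
    ("community", 4, "Social Media Ads"),
    ("public intent", 5, "Google Ads") ]

-- loop body: if term in text and (best is None or prio < best[0]): best = (prio, pack)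
def pvStep (text : String) (best : Option (Nat × String)) (e : String × Nat × String) : Option (Nat × String) :=
  if PySem.Str.isIn e.1 text && (match best with | none => true | some (q, _) => decide (e.2.1 < q))
  then some (e.2.1, e.2.2) else best

def recommend_frontend_pack_alt (search_mode : String) (keyword : String) : String :=
  let text := PySem.Str.lower (search_mode ++ " " ++ keyword)
  match pvTermRules.foldl (pvStep text) none with
  | some (_, pack) => pack
  | none => "SEO"

-- ===== PRECONDITION & SPEC =====
def Spec_recommend_frontend_pack (search_mode : String) (keyword : String) (out : String) : Prop := out = recommend_frontend_pack_alt search_mode keyword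
instance (search_mode : String) (keyword : String) (out : String) : Decidable (Spec_recommend_frontend_pack search_mode keyword out) := by unfold Spec_recommend_frontend_pack; infer_instance

-- ===== CLAIM (what is proved, stated in full; the proofs are below) =====
def Claim_equal_recommend_frontend_pack : Prop := ∀ (search_mode : String) (keyword : String), Dom_recommend_frontend_pack search_mode keyword → Spec_recommend_frontend_pack search_mode keyword (recommend_frontend_pack search_mode keyword)

-- ===== LEMMAS AND PROOFS =====

-- a group of entries all carrying the same priority p
def pvGroup (ts : List String) (p : Nat) (k : String) : List (String × Nat × String) :=
  ts.map (fun t => (t, p, k))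

lemma pvTermRules_split :
    pvTermRules =
      pvGroup ["relocation interest finder"] 0 "Relocation Capture Package" ++
      pvGroup ["moving", "relocation", "interstate", "movers"] 1 "Google Ads" ++
      pvGroup ["event", "grand opening", "launch", "festival", "sale"] 2 "Social Media Ads" ++
      pvGroup ["roofer", "roofing", "plumber", "plumbing", "hvac", "contractor", "cleaner", "cleaning", "landscaping"] 3 "Local SEO + Google Ads" ++
      pvGroup ["community"] 4 "Social Media Ads" ++
      pvGroup ["public intent"] 5 "Google Ads" := rfl

-- once the accumulator holds a priority ≤ p, entries of priority p never update it
lemma fold_group_keep (text : String) (ts : List String) (p : Nat) (k : String)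
    (q : Nat) (pk : String) (h : q ≤ p) :
    (pvGroup ts p k).foldl (pvStep text) (some (q, pk)) = some (q, pk) := by
  induction ts with
  | nil => rfl
  | cons t rest ih =>
      simp [pvGroup, List.foldl_cons, pvStep, Nat.not_lt.mpr h] at ih ⊢
      exact ih

-- from an empty accumulator, a priority-p group yields (p, k) iff some of its terms matches
lemma fold_group_none (text : String) (ts : List String) (p : Nat) (k : String) :
    (pvGroup ts p k).foldl (pvStep text) none =
      if ts.any (fun t => PySem.Str.isIn t text) then some (p, k) else none := by
  induction ts with
  | nil => rfl
  | cons t rest ih =>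
      have keep := fold_group_keep text rest p k p k (le_refl p)
      simp only [pvGroup, List.map_cons, List.foldl_cons, List.any_cons] at keep ih ⊢
      by_cases h : PySem.Str.isIn t text = true
      · rw [show pvStep text none (t, p, k) = some (p, k) from by
          simp only [pvStep]; rw [h]; simp, keep]
        simp only [h, Bool.true_or, if_true]
      · have h' : PySem.Str.isIn t text = false := by
          rwa [Bool.not_eq_true] at h
        rw [show pvStep text none (t, p, k) = none from by
          simp only [pvStep]; rw [h']; simp, ih]
        simp only [h', Bool.false_or]

-- ===== VERDICT (by name: the statement is the Claim_ definition above) =====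
theorem recommend_frontend_pack_spec : Claim_equal_recommend_frontend_pack := by
  intro s k _
  show _ = _
  unfold recommend_frontend_pack recommend_frontend_pack_alt
  rw [pvTermRules_split]
  simp only [List.foldl_append]
  by_cases h0 : PySem.Str.isIn "relocation interest finder" (PySem.Str.lower (s ++ " " ++ k))
  · simp only [fold_group_none, fold_group_keep, List.any_cons, List.any_nil, h0,
      Bool.or_false, if_true, Nat.zero_le]
  by_cases h1 : (["moving", "relocation", "interstate", "movers"] : List String).any
      (fun term => PySem.Str.isIn term (PySem.Str.lower (s ++ " " ++ k)))
  · simp only [fold_group_none, fold_group_keep, List.any_cons, List.any_nil, h0, h1,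
      Bool.or_false, Bool.false_eq_true, if_true, if_false, Nat.reduceLeDiff]
  by_cases h2 : (["event", "grand opening", "launch", "festival", "sale"] : List String).any
      (fun term => PySem.Str.isIn term (PySem.Str.lower (s ++ " " ++ k)))
  · simp only [fold_group_none, fold_group_keep, List.any_cons, List.any_nil, h0, h1, h2,
      Bool.or_false, Bool.false_eq_true, if_true, if_false, Nat.reduceLeDiff]
  by_cases h3 : (["roofer", "roofing", "plumber", "plumbing", "hvac", "contractor", "cleaner", "cleaning", "landscaping"] : List String).any
      (fun term => PySem.Str.isIn term (PySem.Str.lower (s ++ " " ++ k)))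
  · simp only [fold_group_none, fold_group_keep, List.any_cons, List.any_nil, h0, h1, h2, h3,
      Bool.or_false, Bool.false_eq_true, if_true, if_false, Nat.reduceLeDiff]
  by_cases h4 : PySem.Str.isIn "community" (PySem.Str.lower (s ++ " " ++ k))
  · simp only [fold_group_none, fold_group_keep, List.any_cons, List.any_nil, h0, h1, h2, h3, h4,
      Bool.or_false, Bool.false_eq_true, if_true, if_false, Nat.reduceLeDiff]
  by_cases h5 : PySem.Str.isIn "public intent" (PySem.Str.lower (s ++ " " ++ k))
  · simp only [fold_group_none, List.any_cons, List.any_nil, h0, h1, h2, h3, h4, h5,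
      Bool.or_false, Bool.false_eq_true, if_true, if_false]
  simp only [fold_group_none, List.any_cons, List.any_nil, h0, h1, h2, h3, h4, h5,
    Bool.or_false, Bool.false_eq_true, if_false]
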